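-- pv_equiv track=rewrite | github.com/COMSOC-Community/prefsampling | prefsampling/ordinal/groupseparable.py | _cycle_lemma
-- ===== SOURCE A (Python) =====
-- def _cycle_lemma(sequence):
--     pos = 0
--     height = 0
--     min_height = 0
--     pos_min = 0
--     for element in sequence:
--         if "x" in element or "v" in element:
--             if height <= min_height:
--                 pos_min = pos
--                 min_height = height
--             height += 1
--         if "f" in element:
--             height -= 1
--         pos += 1
--
--     # TODO: I don't understand why there is no randomness here
--
--     # rotate
--     for _ in range(pos_min):
--         element = sequence.pop(0)
--         sequence.append(element)
--
--     return sequence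
-- ===== SOURCE B (Python) =====
-- def _cycle_lemma(sequence):
--     records = []
--     height = 0
--     for pos, element in enumerate(sequence):
--         if "x" in element or "v" in element:
--             records.append((pos, height))
--             height += 1
--         if "f" in element:
--             height -= 1
--     if records:
--         m = min(h for _, h in records)
--         pos_min = 0
--         for p, h in records:
--             if h == m:
--                 pos_min = p
--     else:
--         pos_min = 0
--     sequence[:] = sequence[pos_min:] + sequence[:pos_min]
--     return sequence
-- ===== Notes on version B (the rewrite author's own statement) =====
-- stated objective: alternative
-- what changed: A's single running-minimum scan with in-place pop(0)/append rotation is replaced by a build-records-then-argmin decomposition (collect (pos, height) records, take the minimum height and the last position achieving it) followed by a slice-based rotation.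
import Mathlib
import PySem

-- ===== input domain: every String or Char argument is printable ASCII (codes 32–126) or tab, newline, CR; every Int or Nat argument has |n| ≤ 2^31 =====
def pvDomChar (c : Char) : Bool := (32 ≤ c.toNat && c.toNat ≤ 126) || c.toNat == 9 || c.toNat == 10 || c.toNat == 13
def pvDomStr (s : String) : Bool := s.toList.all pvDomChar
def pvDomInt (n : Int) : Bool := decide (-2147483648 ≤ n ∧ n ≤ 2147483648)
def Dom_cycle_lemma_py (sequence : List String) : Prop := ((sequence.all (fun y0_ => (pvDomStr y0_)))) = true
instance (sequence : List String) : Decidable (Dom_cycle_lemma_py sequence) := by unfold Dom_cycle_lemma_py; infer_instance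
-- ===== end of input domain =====

-- B replaces A's running-minimum scan + pop(0)/append rotation by a records-table-then-argmin
-- decomposition with a slice rotation ('alternative'); both mutate the list in place in Python,
-- the equivalence proved here is about the returned value.

-- ===== PORT A =====
-- loop body of A's first loop: state (pos, height, min_height, pos_min)
def stepLoopA (st : Int × Int × Int × Int) (element : String) : Int × Int × Int × Int :=
  let (pos, height, min_height, pos_min) := st
  let (height, min_height, pos_min) :=
    if PySem.Str.isIn "x" element || PySem.Str.isIn "v" element then
      if height ≤ min_height then (height + 1, height, pos)
      else (height + 1, min_height, pos_min)
    else (height, min_height, pos_min)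
  let height := if PySem.Str.isIn "f" element then height - 1 else height
  (pos + 1, height, min_height, pos_min)

-- A's rotation loop: pos_min times pop the head and append it
def rotLoopA : List String → Nat → List String
  | seq, 0 => seq
  | [], _ + 1 => []            -- unreachable from cycle_lemma_py (pos_min = 0 on an empty list)
  | h :: t, n + 1 => rotLoopA (t ++ [h]) n

def cycle_lemma_py (sequence : List String) : List String :=
  let st := sequence.foldl stepLoopA (0, 0, 0, 0)
  rotLoopA sequence st.2.2.2.toNat

-- ===== PORT B =====
-- loop body of B's first pass: state (records, height)
def stepLoopB (st : List (Int × Int) × Int) (pe : Int × String) : List (Int × Int) × Int :=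
  let (records, height) := st
  let (pos, element) := pe
  let (records, height) :=
    if PySem.Str.isIn "x" element || PySem.Str.isIn "v" element then
      (records ++ [(pos, height)], height + 1)
    else (records, height)
  let height := if PySem.Str.isIn "f" element then height - 1 else height
  (records, height)

def cycle_lemma_py_alt (sequence : List String) : List String :=
  let records := ((PySem.List.enumerate sequence).foldl stepLoopB ([], 0)).1
  let pos_min : Int :=
    match PySem.List.min? (records.map Prod.snd) (fun h => h) with
    | none => 0
    | some m => records.foldl (fun acc r => if r.2 = m then r.1 else acc) 0
  PySem.List.slice sequence (some pos_min) none ++ PySem.List.slice sequence none (some pos_min)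

-- ===== PRECONDITION & SPEC =====
def Spec_cycle_lemma_py (sequence : List String) (out : List String) : Prop := out = cycle_lemma_py_alt sequence
instance (sequence : List String) (out : List String) : Decidable (Spec_cycle_lemma_py sequence out) := by unfold Spec_cycle_lemma_py; infer_instance

-- ===== CLAIM (what is proved, stated in full; the proofs are below) =====
def Claim_equal_cycle_lemma_py : Prop := ∀ (sequence : List String), Dom_cycle_lemma_py sequence → Spec_cycle_lemma_py sequence (cycle_lemma_py sequence)

-- ===== LEMMAS AND PROOFS =====

-- the records both first passes compute, in direct recursive form
def recsOf : List String → Int → Int → List (Int × Int)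
  | [], _, _ => []
  | e :: rest, pos, height =>
    let xv := PySem.Str.isIn "x" e || PySem.Str.isIn "v" e
    let h1 := if xv then height + 1 else height
    let h2 := if PySem.Str.isIn "f" e then h1 - 1 else h1
    (if xv then [(pos, height)] else []) ++ recsOf rest (pos + 1) h2

-- A's running-minimum update, viewed as a step over records
def stepA (s : Int × Int) (r : Int × Int) : Int × Int := if r.2 ≤ s.1 then (r.2, r.1) else s

def lastEq (l : List (Int × Int)) (m d : Int) : Int :=
  l.foldl (fun acc r => if r.2 = m then r.1 else acc) d

lemma foldB_recs : ∀ (seq : List String) (pos height : Int) (acc : List (Int × Int)),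
    ((PySem.List.enumerate seq pos).foldl stepLoopB (acc, height)).1
      = acc ++ recsOf seq pos height := by
  intro seq
  induction seq with
  | nil => intro pos height acc; simp [PySem.List.enumerate_nil, recsOf]
  | cons e rest ih =>
    intro pos height acc
    rw [PySem.List.enumerate_cons]
    simp only [List.foldl_cons, recsOf, stepLoopB]
    by_cases hxv : (PySem.Str.isIn "x" e || PySem.Str.isIn "v" e) = true <;>
      by_cases hf : PySem.Str.isIn "f" e = true <;>
        simp only [hxv, hf, reduceIte, Bool.false_eq_true] <;>
          rw [ih] <;> simp [List.append_assoc]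

lemma foldA_recs : ∀ (seq : List String) (pos height mh pm : Int),
    (seq.foldl stepLoopA (pos, height, mh, pm)).2.2
      = (recsOf seq pos height).foldl stepA (mh, pm) := by
  intro seq
  induction seq with
  | nil => intro pos height mh pm; simp [recsOf]
  | cons e rest ih =>
    intro pos height mh pm
    simp only [List.foldl_cons, recsOf, stepLoopA]
    by_cases hxv : (PySem.Str.isIn "x" e || PySem.Str.isIn "v" e) = true <;>
      by_cases hf : PySem.Str.isIn "f" e = true <;>
        (by_cases hle : height ≤ mh <;>
          simp only [hxv, hf, hle, reduceIte, Bool.false_eq_true, List.foldl_cons,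
            List.singleton_append, List.nil_append, stepA] <;>
          rw [ih])

-- the first record's height is at most the initial height
lemma recs_head_le : ∀ (seq : List String) (pos height : Int),
    recsOf seq pos height = [] ∨
      ∃ p h t, recsOf seq pos height = (p, h) :: t ∧ h ≤ height := by
  intro seq
  induction seq with
  | nil => intro pos height; left; rfl
  | cons e rest ih =>
    intro pos height
    by_cases hxv : (PySem.Str.isIn "x" e || PySem.Str.isIn "v" e) = true
    · right
      have hstep : recsOf (e :: rest) pos height
          = (pos, height) :: recsOf rest (pos + 1)
              (if PySem.Str.isIn "f" e then (height + 1) - 1 else height + 1) := by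
        simp only [recsOf, hxv, reduceIte, List.singleton_append]
      exact ⟨pos, height, _, hstep, le_refl _⟩
    · have h2 : recsOf (e :: rest) pos height
          = recsOf rest (pos + 1) (if PySem.Str.isIn "f" e then height - 1 else height) := by
        simp only [recsOf, hxv, Bool.false_eq_true, reduceIte, List.nil_append]
      rcases ih (pos + 1) (if PySem.Str.isIn "f" e then height - 1 else height) with hnil | ⟨p, h, t, heq, hle⟩
      · left; rw [h2, hnil]
      · right
        refine ⟨p, h, t, by rw [h2, heq], ?_⟩
        split_ifs at hle with hf <;> omega

-- positions of records lie in [pos, pos + length)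
lemma recs_pos_mem : ∀ (seq : List String) (pos height : Int) (r : Int × Int),
    r ∈ recsOf seq pos height → pos ≤ r.1 ∧ r.1 < pos + seq.length := by
  intro seq
  induction seq with
  | nil => intro pos height r hr; simp [recsOf] at hr
  | cons e rest ih =>
    intro pos height r hr
    by_cases hxv : (PySem.Str.isIn "x" e || PySem.Str.isIn "v" e) = true <;>
      simp only [recsOf, hxv, Bool.false_eq_true, reduceIte, List.nil_append,
        List.singleton_append, List.mem_cons] at hr
    · rcases hr with hr | hr
      · subst hr
        simp only [List.length_cons]
        constructor
        · exact le_refl pos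
        · push_cast; omega
      · have := ih (pos + 1) _ r hr
        simp only [List.length_cons]
        push_cast
        omega
    · have := ih (pos + 1) _ r hr
      simp only [List.length_cons]
      push_cast
      omega

lemma fmin_le_init : ∀ (l : List Int) (a : Int), l.foldl min a ≤ a := by
  intro l
  induction l with
  | nil => intro a; simp
  | cons x t ih =>
    intro a
    simp only [List.foldl_cons]
    exact le_trans (ih (min a x)) (min_le_left a x)

lemma fmin_mem : ∀ (l : List Int) (a : Int), l.foldl min a = a ∨ l.foldl min a ∈ l := by
  intro l
  induction l with
  | nil => intro a; left; rfl
  | cons x t ih =>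
    intro a
    simp only [List.foldl_cons]
    rcases ih (min a x) with heq | hmem
    · rcases min_cases a x with ⟨h1, _⟩ | ⟨h1, _⟩
      · left; rw [heq, h1]
      · right; rw [heq, h1]; simp
    · right; simp [hmem]
  
lemma fmin_of_forall_gt : ∀ (l : List Int) (a : Int), (∀ x ∈ l, a < x) → l.foldl min a = a := by
  intro l
  induction l with
  | nil => intro a _; rfl
  | cons x t ih =>
    intro a hall
    have hax : a < x := hall x (by simp)
    simp only [List.foldl_cons, min_eq_left (le_of_lt hax)]
    exact ih a (fun y hy => hall y (by simp [hy]))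

lemma lastEq_not_mem : ∀ (l : List (Int × Int)) (m d : Int), m ∉ l.map Prod.snd → lastEq l m d = d := by
  intro l
  induction l with
  | nil => intro m d _; rfl
  | cons r t ih =>
    intro m d hm
    simp only [List.map_cons, List.mem_cons, not_or] at hm
    simp only [lastEq, List.foldl_cons]
    rw [if_neg (fun h => hm.1 h.symm)]
    exact ih m d hm.2

lemma lastEq_mem_irrel : ∀ (l : List (Int × Int)) (m d d' : Int), m ∈ l.map Prod.snd → lastEq l m d = lastEq l m d' := by
  intro l
  induction l with
  | nil => intro m d d' hm; simp at hm
  | cons r t ih =>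
    intro m d d' hm
    simp only [lastEq, List.foldl_cons]
    by_cases hmem : m ∈ t.map Prod.snd
    · exact ih m _ _ hmem
    · simp only [List.map_cons, List.mem_cons] at hm
      rcases hm with hm | hm
      · simp only [if_pos hm.symm]
      · exact absurd hm hmem

-- the value of lastEq is the default or a recorded position
lemma lastEq_cases : ∀ (l : List (Int × Int)) (m d : Int),
    lastEq l m d = d ∨ ∃ r ∈ l, lastEq l m d = r.1 := by
  intro l
  induction l with
  | nil => intro m d; left; rfl
  | cons r t ih =>
    intro m d
    simp only [lastEq, List.foldl_cons]
    by_cases hr : r.2 = m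
    · rw [if_pos hr]
      rcases ih m r.1 with heq | ⟨r', hr', heq⟩
      · right; exact ⟨r, by simp, heq⟩
      · right; exact ⟨r', by simp [hr'], heq⟩
    · rw [if_neg hr]
      rcases ih m d with heq | ⟨r', hr', heq⟩
      · left; exact heq
      · right; exact ⟨r', by simp [hr'], heq⟩

-- characterization of A's running-minimum fold over the records
lemma scanA_char : ∀ (l : List (Int × Int)) (mh pm : Int),
    l.foldl stepA (mh, pm) =
      if ∃ r ∈ l, r.2 ≤ mh then
        ((l.map Prod.snd).foldl min mh, lastEq l ((l.map Prod.snd).foldl min mh) pm)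
      else (mh, pm) := by
  intro l
  induction l with
  | nil => intro mh pm; simp
  | cons r t ih =>
    intro mh pm
    obtain ⟨p, h⟩ := r
    simp only [List.foldl_cons, List.map_cons]
    by_cases hle : h ≤ mh
    · rw [show stepA (mh, pm) (p, h) = (h, p) by simp [stepA, hle]]
      rw [ih h p]
      have hmin : min mh h = h := min_eq_right hle
      have hex : ∃ r ∈ (p, h) :: t, r.2 ≤ mh := ⟨(p, h), by simp, hle⟩
      rw [if_pos hex, hmin]
      by_cases hex2 : ∃ r ∈ t, r.2 ≤ h
      · rw [if_pos hex2]
        set m := (t.map Prod.snd).foldl min h with hm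
        have : lastEq ((p, h) :: t) m pm = lastEq t m (if h = m then p else pm) := by
          simp [lastEq, List.foldl_cons]
        rw [this]
        by_cases hhm : h = m
        · rw [if_pos hhm]
        · rw [if_neg hhm]
          have hmem : m ∈ t.map Prod.snd := by
            rcases fmin_mem (t.map Prod.snd) h with heq | hmem
            · exact absurd heq.symm hhm
            · exact hmem
          rw [lastEq_mem_irrel t m p pm hmem]
      · rw [if_neg hex2]
        push Not at hex2
        have hmin2 : (t.map Prod.snd).foldl min h = h := by
          apply fmin_of_forall_gt
          intro x hx
          simp only [List.mem_map] at hx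
          obtain ⟨r', hr', hrx⟩ := hx
          have := hex2 r' hr'
          omega
        rw [hmin2]
        have hnot : h ∉ t.map Prod.snd := by
          intro hmem
          simp only [List.mem_map] at hmem
          obtain ⟨r', hr', hrx⟩ := hmem
          have := hex2 r' hr'
          omega
        have : lastEq ((p, h) :: t) h pm = lastEq t h p := by
          simp [lastEq, List.foldl_cons]
        rw [this, lastEq_not_mem t h p hnot]
    · rw [show stepA (mh, pm) (p, h) = (mh, pm) by simp [stepA, hle]]
      rw [ih mh pm]
      have hmin : min mh h = mh := min_eq_left (by omega)
      by_cases hex2 : ∃ r ∈ t, r.2 ≤ mh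
      · have hex : ∃ r ∈ (p, h) :: t, r.2 ≤ mh := by
          obtain ⟨r', hr', hle'⟩ := hex2
          exact ⟨r', by simp [hr'], hle'⟩
        rw [if_pos hex2, if_pos hex, hmin]
        set m := (t.map Prod.snd).foldl min mh with hm
        have hmmh : m ≤ mh := fmin_le_init _ _
        have hhm : ¬ (h = m) := by omega
        have : lastEq ((p, h) :: t) m pm = lastEq t m (if h = m then p else pm) := by
          simp [lastEq, List.foldl_cons]
        rw [this, if_neg hhm]
      · rw [if_neg hex2]
        have hex : ¬ ∃ r ∈ (p, h) :: t, r.2 ≤ mh := by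
          push Not at hex2 ⊢
          intro r' hr'
          rcases List.mem_cons.mp hr' with heq | hmem
          · subst heq; show mh < h; omega
          · exact hex2 r' hmem
        rw [if_neg hex]

-- the rotation loop is drop ++ take
lemma rotLoopA_eq : ∀ (n : Nat) (seq : List String), n ≤ seq.length →
    rotLoopA seq n = seq.drop n ++ seq.take n := by
  intro n
  induction n with
  | zero => intro seq _; simp [rotLoopA]
  | succ k ih =>
    intro seq hn
    match seq with
    | [] => simp at hn
    | h :: t =>
      simp only [List.length_cons] at hn
      have hk : k ≤ t.length := by omega
      have hk' : k ≤ (t ++ [h]).length := by simp; omega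
      rw [show rotLoopA (h :: t) (k + 1) = rotLoopA (t ++ [h]) k from rfl, ih _ hk']
      rw [List.drop_append_of_le_length hk, List.take_append_of_le_length hk]
      simp

-- ===== VERDICT (by name: the statement is the Claim_ definition above) =====
theorem cycle_lemma_py_spec : Claim_equal_cycle_lemma_py := by
  intro sequence _
  simp only [Spec_cycle_lemma_py, cycle_lemma_py, cycle_lemma_py_alt]
  rw [foldB_recs sequence 0 0 [], List.nil_append, foldA_recs]
  rcases recs_head_le sequence 0 0 with hnil | ⟨p1, h1, t, heq, hle⟩
  · rw [hnil]
    simp [PySem.List.min?, rotLoopA, PySem.List.slice_to sequence (le_refl (0 : Int))]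
  · rw [heq, scanA_char]
    have hex : ∃ r ∈ (p1, h1) :: t, r.2 ≤ (0 : Int) := ⟨(p1, h1), by simp, hle⟩
    rw [if_pos hex]
    simp only [List.map_cons, List.foldl_cons, PySem.List.min?_id_cons,
      min_eq_right hle]
    set m := (t.map Prod.snd).foldl min h1 with hm
    set pm := lastEq ((p1, h1) :: t) m 0 with hpm
    have hb : 0 ≤ pm ∧ pm ≤ (sequence.length : Int) := by
      rcases lastEq_cases ((p1, h1) :: t) m 0 with h0 | ⟨r, hrmem, hreq⟩
      · rw [← hpm] at h0
        constructor
        · omega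
        · rw [h0]; positivity
      · rw [← hpm] at hreq
        have := recs_pos_mem sequence 0 0 r (by rw [heq]; exact hrmem)
        omega
    have hfold2 : (List.foldl (fun acc r => if r.2 = m then r.1 else acc)
        (if h1 = m then p1 else 0) t) = pm := rfl
    rw [rotLoopA_eq pm.toNat sequence (by omega), hfold2,
        PySem.List.slice_from sequence hb.1, PySem.List.slice_to sequence hb.1]
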